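-- pv_equiv track=rewrite | github.com/sunhao-java/kimi-code-switch | src/kimi_code_switch/preview.py | extract_compact_diff_lines
-- ===== SOURCE A (Python) =====
-- def extract_compact_diff_lines(diff_text: str) -> dict[str, list[str]]:
--     changes: dict[str, list[str]] = {"added": [], "removed": [], "modified": []}
--     pending_removed: list[str] = []
--     pending_added: list[str] = []
--
--     def flush_pending() -> None:
--         pairs = min(len(pending_removed), len(pending_added))
--         for index in range(pairs):
--             changes["modified"].append(
--                 f"  ~ {pending_removed[index]} -> {pending_added[index]}"
--             )
--         for line in pending_added[pairs:]:
--             changes["added"].append(f"  + {line}")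
--         for line in pending_removed[pairs:]:
--             changes["removed"].append(f"  - {line}")
--         pending_removed.clear()
--         pending_added.clear()
--
--     for line in diff_text.splitlines():
--         if not line or line.startswith(("---", "+++")):
--             continue
--         if line.startswith("@@"):
--             flush_pending()
--             continue
--         if line.startswith("+"):
--             pending_added.append(line[1:])
--         elif line.startswith("-"):
--             if pending_added:
--                 flush_pending()
--             pending_removed.append(line[1:])
--         else:
--             flush_pending()
--     flush_pending()
--     return changes
-- ===== SOURCE B (Python) =====
-- def extract_compact_diff_lines(diff_text: str) -> dict[str, list[str]]:
--     # Pass 1: collect (removed, added) groups; a group closes on '@@', on a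
--     # context line, or when a '-' line arrives after '+' lines.
--     groups: list[tuple[list[str], list[str]]] = []
--     cur_removed: list[str] = []
--     cur_added: list[str] = []
--     for line in diff_text.splitlines():
--         if not line or line.startswith(("---", "+++")):
--             continue
--         if line.startswith("+"):
--             cur_added.append(line[1:])
--         elif line.startswith("-"):
--             if cur_added:
--                 groups.append((cur_removed, cur_added))
--                 cur_removed, cur_added = [line[1:]], []
--             else:
--                 cur_removed.append(line[1:])
--         else:  # '@@' hunk header or context line: close the current group
--             groups.append((cur_removed, cur_added))
--             cur_removed, cur_added = [], []
--     groups.append((cur_removed, cur_added))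
--
--     # Pass 2: emit each group: paired lines are modified, tails added/removed.
--     added: list[str] = []
--     removed: list[str] = []
--     modified: list[str] = []
--     for rem, add in groups:
--         for r, a in zip(rem, add):
--             modified.append(f"  ~ {r} -> {a}")
--         for a in add[len(rem):]:
--             added.append(f"  + {a}")
--         for r in rem[len(add):]:
--             removed.append(f"  - {r}")
--     return {"added": added, "removed": removed, "modified": modified}
-- ===== Notes on version B (the rewrite author's own statement) =====
-- stated objective: alternative
-- what changed: Replaced the incremental flush-as-you-go accumulation with a two-pass design: pass 1 builds a list of (removed, added) groups, pass 2 zips each group to emit modified/added/removed entries.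
import Mathlib
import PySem

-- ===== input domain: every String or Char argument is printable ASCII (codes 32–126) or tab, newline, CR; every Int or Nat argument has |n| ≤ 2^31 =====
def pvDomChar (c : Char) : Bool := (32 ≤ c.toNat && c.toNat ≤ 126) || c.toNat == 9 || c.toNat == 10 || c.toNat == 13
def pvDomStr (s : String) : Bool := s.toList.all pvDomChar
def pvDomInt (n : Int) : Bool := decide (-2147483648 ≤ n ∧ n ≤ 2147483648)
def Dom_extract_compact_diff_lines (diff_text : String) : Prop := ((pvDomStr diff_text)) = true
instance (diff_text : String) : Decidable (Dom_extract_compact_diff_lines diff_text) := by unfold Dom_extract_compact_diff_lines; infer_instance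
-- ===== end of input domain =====

-- B replaces A's incremental flush-as-you-go accumulation by a two-pass design
-- (collect (removed, added) groups, then emit each group by zipping); same results.

-- ===== PORT A =====
-- A's state: the three dict values (keys "added"/"removed"/"modified" fixed) plus the two pending lists.
structure PVStA where
  added : List String
  removed : List String
  modified : List String
  pr : List (List Char)
  pa : List (List Char)
deriving Repr, DecidableEq

-- flush_pending: range-indexed pairing, then the unpaired tails (getD is exact: i < pairs ≤ length)
def pvFlushA (st : PVStA) : PVStA :=
  let pairs := min st.pr.length st.pa.length
  { added := st.added ++ ((st.pa.drop pairs).map fun l => String.ofList ("  + ".toList ++ l)),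
    removed := st.removed ++ ((st.pr.drop pairs).map fun l => String.ofList ("  - ".toList ++ l)),
    modified := st.modified ++ ((List.range pairs).map fun i =>
      String.ofList ("  ~ ".toList ++ st.pr.getD i [] ++ " -> ".toList ++ st.pa.getD i [])),
    pr := [], pa := [] }

-- one iteration of A's for-loop; line[1:] on a nonempty line = List.tail (exact)
def pvStepA (st : PVStA) (line : List Char) : PVStA :=
  if line.isEmpty || PySem.Chars.startswith line "---".toList || PySem.Chars.startswith line "+++".toList then st
  else if PySem.Chars.startswith line "@@".toList then pvFlushA st
  else if PySem.Chars.startswith line "+".toList then { st with pa := st.pa ++ [line.tail] }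
  else if PySem.Chars.startswith line "-".toList then
    let st' := if st.pa.isEmpty then st else pvFlushA st
    { st' with pr := st'.pr ++ [line.tail] }
  else pvFlushA st

def extract_compact_diff_lines (diff_text : String) : List (String × List String) :=
  let st := (PySem.Chars.splitlines diff_text.toList).foldl pvStepA ⟨[], [], [], [], []⟩
  let st := pvFlushA st
  [("added", st.added), ("removed", st.removed), ("modified", st.modified)]

-- ===== PORT B =====
-- B's pass-1 state: finished groups plus the currently open group.
structure PVStB where
  groups : List (List (List Char) × List (List Char))
  cr : List (List Char)
  ca : List (List Char)
deriving Repr, DecidableEq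

def pvStepB (st : PVStB) (line : List Char) : PVStB :=
  if line.isEmpty || PySem.Chars.startswith line "---".toList || PySem.Chars.startswith line "+++".toList then st
  else if PySem.Chars.startswith line "+".toList then { st with ca := st.ca ++ [line.tail] }
  else if PySem.Chars.startswith line "-".toList then
    if st.ca.isEmpty then { st with cr := st.cr ++ [line.tail] }
    else { groups := st.groups ++ [(st.cr, st.ca)], cr := [line.tail], ca := [] }
  else { groups := st.groups ++ [(st.cr, st.ca)], cr := [], ca := [] }

-- pass 2: emit one group into the (added, removed, modified) accumulator
def pvEmitB (acc : List String × List String × List String)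
    (g : List (List Char) × List (List Char)) : List String × List String × List String :=
  (acc.1 ++ ((g.2.drop g.1.length).map fun l => String.ofList ("  + ".toList ++ l)),
   acc.2.1 ++ ((g.1.drop g.2.length).map fun l => String.ofList ("  - ".toList ++ l)),
   acc.2.2 ++ ((g.1.zip g.2).map fun p => String.ofList ("  ~ ".toList ++ p.1 ++ " -> ".toList ++ p.2)))

def extract_compact_diff_lines_alt (diff_text : String) : List (String × List String) :=
  let st := (PySem.Chars.splitlines diff_text.toList).foldl pvStepB ⟨[], [], []⟩
  let gs := st.groups ++ [(st.cr, st.ca)]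
  let res := gs.foldl pvEmitB ([], [], [])
  [("added", res.1), ("removed", res.2.1), ("modified", res.2.2)]

-- ===== PRECONDITION & SPEC =====
def Spec_extract_compact_diff_lines (diff_text : String) (out : List (String × List String)) : Prop := out = extract_compact_diff_lines_alt diff_text
instance (diff_text : String) (out : List (String × List String)) : Decidable (Spec_extract_compact_diff_lines diff_text out) := by unfold Spec_extract_compact_diff_lines; infer_instance

-- ===== CLAIM (what is proved, stated in full; the proofs are below) =====
def Claim_equal_extract_compact_diff_lines : Prop := ∀ (diff_text : String), Dom_extract_compact_diff_lines diff_text → Spec_extract_compact_diff_lines diff_text (extract_compact_diff_lines diff_text)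

-- ===== LEMMAS AND PROOFS =====

def pvAddOf (g : List (List Char) × List (List Char)) : List String :=
  (g.2.drop g.1.length).map fun l => String.ofList ("  + ".toList ++ l)
def pvRemOf (g : List (List Char) × List (List Char)) : List String :=
  (g.1.drop g.2.length).map fun l => String.ofList ("  - ".toList ++ l)
def pvModOf (g : List (List Char) × List (List Char)) : List String :=
  (g.1.zip g.2).map fun p => String.ofList ("  ~ ".toList ++ p.1 ++ " -> ".toList ++ p.2)

def pvToA (st : PVStB) : PVStA :=
  ⟨st.groups.flatMap pvAddOf, st.groups.flatMap pvRemOf, st.groups.flatMap pvModOf, st.cr, st.ca⟩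

theorem pv_range_zip {α β γ : Type} (f : α → β → γ) (d1 : α) (d2 : β) :
    ∀ (r : List α) (a : List β),
      (List.range (min r.length a.length)).map (fun i => f (r.getD i d1) (a.getD i d2))
        = (r.zip a).map fun p => f p.1 p.2 := by
  intro r
  induction r with
  | nil => intro a; simp
  | cons x r ih =>
    intro a
    cases a with
    | nil => simp
    | cons y a =>
      simp only [List.length_cons, Nat.succ_min_succ, List.range_succ_eq_map,
        List.map_cons, List.map_map, List.zip_cons_cons]
      refine congrArg₂ _ rfl ?_
      simpa [Function.comp] using ih a

theorem pv_drop_min_left {α : Type} (r a : List α) : a.drop (min r.length a.length) = a.drop r.length := by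
  rcases Nat.le_total r.length a.length with h | h
  · rw [Nat.min_eq_left h]
  · rw [Nat.min_eq_right h, List.drop_of_length_le le_rfl, List.drop_of_length_le h]

theorem pv_drop_min_right {α : Type} (r a : List α) : r.drop (min r.length a.length) = r.drop a.length := by
  rw [Nat.min_comm]; exact pv_drop_min_left a r

theorem pv_flush_eq (st : PVStB) :
    pvFlushA (pvToA st) = pvToA ⟨st.groups ++ [(st.cr, st.ca)], [], []⟩ := by
  obtain ⟨gs, cr, ca⟩ := st
  simp only [pvFlushA, pvToA, pvAddOf, pvRemOf, pvModOf, List.flatMap_append,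
    List.flatMap_cons, List.flatMap_nil, List.append_nil, PVStA.mk.injEq]
  refine ⟨?_, ?_, ?_, trivial, trivial⟩
  · rw [pv_drop_min_left]
  · rw [pv_drop_min_right]
  · exact congrArg (List.flatMap pvModOf gs ++ ·)
      (pv_range_zip (fun x y => String.ofList ("  ~ ".toList ++ x ++ " -> ".toList ++ y)) [] [] cr ca)

theorem pv_step_comm (st : PVStB) (line : List Char) :
    pvStepA (pvToA st) line = pvToA (pvStepB st line) := by
  cases line with
  | nil => simp [pvStepA, pvStepB]
  | cons c cs =>
    by_cases hplus : c = '+'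
    · subst hplus
      by_cases h3 : List.isPrefixOf ['+', '+'] cs
      · simp [pvStepA, pvStepB, PySem.Chars.startswith, List.isPrefixOf, h3]
      · simp [pvStepA, pvStepB, PySem.Chars.startswith, List.isPrefixOf, h3, pvToA]
    · by_cases hminus : c = '-'
      · subst hminus
        by_cases h3 : List.isPrefixOf ['-', '-'] cs
        · simp [pvStepA, pvStepB, PySem.Chars.startswith, List.isPrefixOf, h3]
        · by_cases hpa : st.ca = []
          · simp [pvStepA, pvStepB, PySem.Chars.startswith, List.isPrefixOf, h3, hpa, pvToA]
          · have hf := pv_flush_eq st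
            simp only [pvToA] at hf
            simp [pvStepA, pvStepB, PySem.Chars.startswith, List.isPrefixOf, h3, hpa, hf, pvToA]
      · by_cases hat : c = '@'
        · subst hat
          by_cases h2 : List.isPrefixOf ['@'] cs
          · simp [pvStepA, pvStepB, PySem.Chars.startswith, List.isPrefixOf, h2, pv_flush_eq]
          · simp [pvStepA, pvStepB, PySem.Chars.startswith, List.isPrefixOf, h2, pv_flush_eq]
        · have e1 : ('+' == c) = false := by simp [Ne.symm hplus]
          have e2 : ('-' == c) = false := by simp [Ne.symm hminus]
          have e3 : ('@' == c) = false := by simp [Ne.symm hat]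
          simp [pvStepA, pvStepB, PySem.Chars.startswith, List.isPrefixOf, e1, e2, e3, pv_flush_eq]

theorem pv_foldl_comm (lines : List (List Char)) :
    ∀ st : PVStB, lines.foldl pvStepA (pvToA st) = pvToA (lines.foldl pvStepB st) := by
  induction lines with
  | nil => intro st; rfl
  | cons l ls ih => intro st; simp only [List.foldl_cons, pv_step_comm, ih]

theorem pv_emit_foldl (gs : List (List (List Char) × List (List Char))) :
    ∀ A R M : List String,
      gs.foldl pvEmitB (A, R, M)
        = (A ++ gs.flatMap pvAddOf, R ++ gs.flatMap pvRemOf, M ++ gs.flatMap pvModOf) := by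
  induction gs with
  | nil => intro A R M; simp
  | cons g gs ih =>
    intro A R M
    simp only [List.foldl_cons, List.flatMap_cons, pvEmitB]
    rw [ih]
    simp [pvAddOf, pvRemOf, pvModOf, List.append_assoc]

-- ===== VERDICT (by name: the statement is the Claim_ definition above) =====
theorem extract_compact_diff_lines_spec : Claim_equal_extract_compact_diff_lines := by
  intro diff_text _
  unfold Spec_extract_compact_diff_lines
  simp only [extract_compact_diff_lines, extract_compact_diff_lines_alt]
  rw [show ({ added := [], removed := [], modified := [], pr := [], pa := [] } : PVStA)
        = pvToA ⟨[], [], []⟩ from rfl,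
      pv_foldl_comm, pv_flush_eq, pv_emit_foldl]
  simp [pvToA]
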